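-- pv_equiv track=rewrite | github.com/thunha14/BD-BI-HK222 | blocking.py | block_records
-- ===== SOURCE A (Python) =====
-- def block_records(data, key_features):
--     blocks = {}
--     for record in data:
--         for feature in key_features:
--             if feature in record:
--                 if feature not in blocks:
--                     blocks[feature] = []
--                 blocks[feature].append(record)
--                 break
--     return blocks
-- ===== SOURCE B (Python) =====
-- def block_records(data, key_features):
--     # Two-phase: label each record with its first matching feature, then build
--     # each block by a per-key collection pass (return value identical to A's).
--     keys = [next((f for f in key_features if f in record), None) for record in data]
--     order = []
--     for k in keys:
--         if k is not None and k not in order: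
--             order.append(k)
--     return {k: [r for r, kk in zip(data, keys) if kk == k] for k in order}
-- ===== Notes on version B (the rewrite author's own statement) =====
-- stated objective: alternative
-- what changed: Replaces the single nested loop that mutates the dict per record with a two-phase pipeline: first label every record with its first matching feature, then derive the key order and build each block by a per-key collection pass over the labelled records.
import Mathlib
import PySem

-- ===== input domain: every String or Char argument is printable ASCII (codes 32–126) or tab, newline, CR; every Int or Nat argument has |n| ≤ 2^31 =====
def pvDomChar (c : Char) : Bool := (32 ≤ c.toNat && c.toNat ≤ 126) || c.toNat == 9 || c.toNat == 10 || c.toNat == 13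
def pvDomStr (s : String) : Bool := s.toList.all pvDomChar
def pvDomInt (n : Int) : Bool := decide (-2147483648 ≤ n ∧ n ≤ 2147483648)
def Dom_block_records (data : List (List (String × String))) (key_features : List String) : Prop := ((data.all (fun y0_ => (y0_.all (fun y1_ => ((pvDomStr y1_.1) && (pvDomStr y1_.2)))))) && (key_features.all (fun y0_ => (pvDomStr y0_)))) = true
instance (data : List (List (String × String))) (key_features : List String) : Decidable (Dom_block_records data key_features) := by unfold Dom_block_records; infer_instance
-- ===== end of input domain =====

-- B builds the same grouping by a two-phase pipeline (label records with their first
-- matching feature, then collect per key) instead of A's per-record dict mutation.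

-- ===== PORT A =====
-- inner 'for feature in key_features: … break' of A (records are dicts: 'in' = key membership)
def blockInner (blocks : PySem.Dict String (List (List (String × String))))
    (record : List (String × String)) : List String →
    PySem.Dict String (List (List (String × String)))
  | [] => blocks
  | feature :: rest =>
    if (record.map Prod.fst).contains feature then
      let blocks1 := if blocks.contains feature then blocks else blocks.insert feature []
      blocks1.modify feature [] (fun l => l ++ [record])
    else blockInner blocks record rest

def block_records (data : List (List (String × String))) (key_features : List String) :
    List (String × List (List (String × String))) :=
  (data.foldl (fun blocks record => blockInner blocks record key_features) PySem.Dict.empty).items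

-- ===== PORT B =====
-- keys = [next((f for f in key_features if f in record), None) for record in data]
def bFirstKey (key_features : List String) (record : List (String × String)) : Option String :=
  key_features.find? (fun f => (record.map Prod.fst).contains f)

def block_records_alt (data : List (List (String × String))) (key_features : List String) :
    List (String × List (List (String × String))) :=
  let keys := data.map (bFirstKey key_features)
  let order := keys.foldl (fun o k =>
    match k with
    | some f => if o.contains f then o else o ++ [f]
    | none => o) []
  order.map (fun k => (k, ((data.zip keys).filter (fun p => p.2 == some k)).map Prod.fst))

-- ===== PRECONDITION & SPEC =====
def Spec_block_records (data : List (List (String × String))) (key_features : List String) (out : List (String × List (List (String × String)))) : Prop := out = block_records_alt data key_features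
instance (data : List (List (String × String))) (key_features : List String) (out : List (String × List (List (String × String)))) : Decidable (Spec_block_records data key_features out) := by unfold Spec_block_records; infer_instance

-- ===== CLAIM (what is proved, stated in full; the proofs are below) =====
def Claim_equal_block_records : Prop := ∀ (data : List (List (String × String))) (key_features : List String), Dom_block_records data key_features → Spec_block_records data key_features (block_records data key_features)

-- ===== LEMMAS AND PROOFS =====

-- bPairs: the records that get blocked, labelled with their first matching feature
def bPairs (key_features : List String) (data : List (List (String × String))) :
    List (String × List (String × String)) :=
  data.filterMap (fun r => (bFirstKey key_features r).map (fun f => (f, r)))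

theorem blockInner_eq (d : PySem.Dict String (List (List (String × String))))
    (r : List (String × String)) (feats : List String) :
    blockInner d r feats =
      match bFirstKey feats r with
      | none => d
      | some f => d.modify f [] (fun l => l ++ [r]) := by
  induction feats with
  | nil => simp [blockInner, bFirstKey]
  | cons f rest ih =>
    simp only [blockInner, bFirstKey, List.find?_cons]
    cases h : (r.map Prod.fst).contains f
    · simpa [h, bFirstKey] using ih
    · show (let blocks1 := if d.contains f then d else d.insert f []; blocks1.modify f [] (fun l => l ++ [r])) = _
      cases hc : d.contains f
      · have hg : d.getD f [] = [] := by
          simp [PySem.Dict.getD_of_not_contains, hc]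
        simp [PySem.Dict.modify, PySem.Dict.getD_insert_self,
          PySem.Dict.insert_insert_self, hg]
      · simp

theorem foldA (feats : List String) (data : List (List (String × String)))
    (d : PySem.Dict String (List (List (String × String)))) :
    data.foldl (fun b r => blockInner b r feats) d
      = (bPairs feats data).foldl (fun b p => b.modify p.1 [] (fun l => l ++ [p.2])) d := by
  induction data generalizing d with
  | nil => rfl
  | cons r rest ih =>
    simp only [List.foldl_cons, bPairs, List.filterMap_cons]
    rw [blockInner_eq]
    cases h : bFirstKey feats r <;> simp [ih, bPairs]

theorem orderLoop (ks : List (Option String)) (o : List String) :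
    ks.foldl (fun o k =>
      match k with
      | some f => if o.contains f then o else o ++ [f]
      | none => o) o
    = PySem.Set.update o (ks.filterMap id) := by
  induction ks generalizing o with
  | nil => simp [PySem.Set.update]
  | cons k rest ih =>
    cases k with
    | none => simpa using ih o
    | some f =>
      rw [List.foldl_cons, show (some f :: rest).filterMap id = f :: rest.filterMap id from by simp,
        PySem.Set.update_cons, ← ih]
      congr 1

theorem pairsFst (feats : List String) (data : List (List (String × String))) :
    (bPairs feats data).map Prod.fst = (data.map (bFirstKey feats)).filterMap id := by
  simp [bPairs, List.map_filterMap, List.filterMap_map, Option.map_map, Function.comp_def]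

theorem zipFilter (feats : List String) (data : List (List (String × String))) (k : String) :
    ((data.zip (data.map (bFirstKey feats))).filter (fun p => p.2 == some k)).map Prod.fst
      = ((bPairs feats data).filter (fun p => p.1 == k)).map Prod.snd := by
  induction data with
  | nil => rfl
  | cons r rest ih =>
    simp only [List.map_cons, List.zip_cons_cons, bPairs, List.filterMap_cons] at *
    cases h : bFirstKey feats r with
    | none => simpa [h, List.filter_cons] using ih
    | some f =>
      by_cases hf : f = k <;> simp [hf, ih]

-- ===== VERDICT (by name: the statement is the Claim_ definition above) =====
theorem block_records_spec : Claim_equal_block_records := by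
  intro data feats _
  unfold Spec_block_records block_records block_records_alt
  rw [foldA]
  have hnd : ((bPairs feats data).foldl
      (fun b p => b.modify p.1 [] (fun l => l ++ [p.2])) PySem.Dict.empty).keys.Nodup :=
    PySem.Dict.nodup_keys_foldl_modify_key _ Prod.fst [] _ _ PySem.Dict.nodup_keys_empty
  rw [PySem.Dict.items_eq_map_keys _ hnd []]
  rw [PySem.Dict.keys_foldl_modify_key]
  simp only [PySem.Dict.keys_empty, orderLoop, pairsFst]
  apply List.map_congr_left
  intro k hk
  rw [PySem.Dict.getD_foldl_modify_append, PySem.Dict.getD_empty, zipFilter]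
  simp
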